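-- pv_equiv track=rewrite | github.com/omarespejel/worldforge | src/worldforge/providers/http_utils.py | _content_type_is_allowed
-- ===== SOURCE A (Python) =====
-- def _content_type_is_allowed(content_type: str, accepted_content_types: tuple[str, ...]) -> bool:
--     normalized = content_type.split(";", maxsplit=1)[0].strip().lower()
--     for accepted in accepted_content_types:
--         expected = accepted.lower()
--         if expected.endswith("/") and normalized.startswith(expected):
--             return True
--         if normalized == expected:
--             return True
--     return False
-- ===== SOURCE B (Python) =====
-- def _content_type_is_allowed(content_type: str, accepted_content_types: tuple[str, ...]) -> bool:
--     # Invert the match: enumerate the subject's candidate keys (itself plus every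
--     # prefix ending in '/'), then test each accepted pattern by set membership only.
--     normalized = content_type.split(";", maxsplit=1)[0].strip().lower()
--     candidates = {normalized}
--     for i, ch in enumerate(normalized):
--         if ch == "/":
--             candidates.add(normalized[:i + 1])
--     return any(accepted.lower() in candidates for accepted in accepted_content_types)
-- ===== Notes on version B (the rewrite author's own statement) =====
-- stated objective: alternative
-- what changed: B inverts the matching direction: instead of testing each pattern against the subject with endswith/startswith branches, it enumerates the subject's candidate keys once (the normalized type itself plus each of its prefixes ending in '/') into a set, then answers by pure set-membership of each lowercased pattern; correct because a '/'-ending pattern matches iff it IS such a prefix.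
import Mathlib
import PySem

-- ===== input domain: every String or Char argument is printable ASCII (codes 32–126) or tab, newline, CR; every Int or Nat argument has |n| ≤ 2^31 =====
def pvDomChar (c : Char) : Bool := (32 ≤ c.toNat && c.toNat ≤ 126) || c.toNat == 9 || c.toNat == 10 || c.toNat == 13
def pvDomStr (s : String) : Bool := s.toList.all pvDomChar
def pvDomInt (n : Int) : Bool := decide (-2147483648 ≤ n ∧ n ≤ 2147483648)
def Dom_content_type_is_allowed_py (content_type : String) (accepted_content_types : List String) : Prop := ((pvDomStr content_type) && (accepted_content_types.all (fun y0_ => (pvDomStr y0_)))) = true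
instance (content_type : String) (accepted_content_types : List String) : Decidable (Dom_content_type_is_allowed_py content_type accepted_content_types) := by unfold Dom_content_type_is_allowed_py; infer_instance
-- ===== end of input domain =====

-- B inverts the match: instead of testing each pattern with endswith/startswith, it
-- enumerates the subject's candidate keys (itself plus each prefix ending in '/')
-- once and then tests every pattern by set membership only (objective: alternative).

-- ===== PORT A =====
-- normalized = content_type.split(";", maxsplit=1)[0].strip().lower()
-- (split with a nonempty separator always yields a nonempty list, so the defaults are never used)
def pvNormalize (content_type : String) : String :=
  PySem.Str.lower (PySem.Str.strip (((PySem.Str.splitMax? content_type ";" 1).getD []).headD ""))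

def pvLoopA (normalized : String) : List String → Bool
  | [] => false
  | accepted :: rest =>
    let expected := PySem.Str.lower accepted
    if PySem.Str.endswith expected "/" && PySem.Str.startswith normalized expected then true
    else if normalized == expected then true
    else pvLoopA normalized rest

def content_type_is_allowed_py (content_type : String) (accepted_content_types : List String) : Bool :=
  pvLoopA (pvNormalize content_type) accepted_content_types

-- ===== PORT B =====
-- loop body: 'if ch == "/": candidates.add(normalized[:i + 1])'
def pvCandStep (normalized : String) (s : PySem.Set String) (p : Int × Char) : PySem.Set String :=
  if p.2 == '/' then PySem.Set.add s (PySem.Str.slice normalized none (some (p.1 + 1))) else s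

def content_type_is_allowed_py_alt (content_type : String) (accepted_content_types : List String) : Bool :=
  let normalized := pvNormalize content_type
  let candidates :=
    (PySem.List.enumerate normalized.toList 0).foldl (pvCandStep normalized)
      (PySem.Set.add PySem.Set.empty normalized)
  accepted_content_types.any (fun accepted =>
    PySem.Set.contains candidates (PySem.Str.lower accepted))

-- ===== PRECONDITION & SPEC =====
def Spec_content_type_is_allowed_py (content_type : String) (accepted_content_types : List String) (out : Bool) : Prop := out = content_type_is_allowed_py_alt content_type accepted_content_types
instance (content_type : String) (accepted_content_types : List String) (out : Bool) : Decidable (Spec_content_type_is_allowed_py content_type accepted_content_types out) := by unfold Spec_content_type_is_allowed_py; infer_instance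

-- ===== CLAIM (what is proved, stated in full; the proofs are below) =====
def Claim_equal_content_type_is_allowed_py : Prop := ∀ (content_type : String) (accepted_content_types : List String), Dom_content_type_is_allowed_py content_type accepted_content_types → Spec_content_type_is_allowed_py content_type accepted_content_types (content_type_is_allowed_py content_type accepted_content_types)

-- ===== LEMMAS AND PROOFS =====

-- the per-element test of A's scan as one boolean
def pvCond (n e : String) : Bool :=
  (PySem.Str.endswith e "/" && PySem.Str.startswith n e) || n == e

-- A's early-return scan is an 'any' of pvCond over the lowercased patterns
lemma pvLoopA_eq_any (n : String) (l : List String) :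
    pvLoopA n l = l.any (fun a => pvCond n (PySem.Str.lower a)) := by
  induction l with
  | nil => rfl
  | cons a rest ih =>
    rw [List.any_cons, ← ih]
    simp only [pvLoopA, pvCond]
    by_cases h1 : (PySem.Str.endswith (PySem.Str.lower a) "/"
                    && PySem.Str.startswith n (PySem.Str.lower a)) = true
    · rw [h1, if_pos rfl]; simp
    · rw [if_neg h1, Bool.eq_false_iff.mpr h1, Bool.false_or]
      by_cases h2 : (n == PySem.Str.lower a) = true
      · rw [h2, if_pos rfl]; simp
      · rw [if_neg h2, Bool.eq_false_iff.mpr h2, Bool.false_or]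

-- membership in an enumerate list
lemma pv_mem_enumerate {α : Type} (xs : List α) (s : Int) (p : Int × α) :
    p ∈ PySem.List.enumerate xs s ↔ ∃ i : Nat, ∃ h : i < xs.length, p = (s + i, xs[i]) := by
  induction xs generalizing s with
  | nil => simp [PySem.List.enumerate_nil]
  | cons x xs ih =>
    rw [PySem.List.enumerate_cons, List.mem_cons, ih]
    constructor
    · rintro (rfl | ⟨i, h, rfl⟩)
      · exact ⟨0, by simp, by simp⟩
      · refine ⟨i + 1, by simpa using Nat.succ_lt_succ h, ?_⟩
        simp only [List.getElem_cons_succ, Prod.mk.injEq]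
        exact ⟨by push_cast; ring, trivial⟩
    · rintro ⟨i, h, rfl⟩
      cases i with
      | zero => left; simp
      | succ i =>
        right
        refine ⟨i, by simpa using Nat.lt_of_succ_lt_succ (by simpa using h), ?_⟩
        simp only [List.getElem_cons_succ, Prod.mk.injEq]
        exact ⟨by push_cast; ring, trivial⟩

-- membership in the candidate set built by B's loop
lemma pv_mem_foldl_candStep (n : String) (l : List (Int × Char)) (s : PySem.Set String)
    (e : String) :
    e ∈ l.foldl (pvCandStep n) s ↔
      e ∈ s ∨ ∃ p ∈ l, p.2 = '/' ∧ e = PySem.Str.slice n none (some (p.1 + 1)) := by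
  induction l generalizing s with
  | nil => simp
  | cons p rest ih =>
    rw [List.foldl_cons, ih]
    by_cases h : (p.2 == '/') = true
    · rw [show pvCandStep n s p = PySem.Set.add s (PySem.Str.slice n none (some (p.1 + 1)))
            from by simp [pvCandStep, h]]
      rw [PySem.Set.mem_add]
      constructor
      · rintro (⟨h1 | h1⟩ | ⟨q, hq, h2, h3⟩)
        · exact Or.inl h1
        · exact Or.inr ⟨p, List.mem_cons_self, beq_iff_eq.mp h, h1⟩
        · exact Or.inr ⟨q, List.mem_cons_of_mem _ hq, h2, h3⟩
      · rintro (h1 | ⟨q, hq, h2, h3⟩)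
        · exact Or.inl (Or.inl h1)
        · rcases List.mem_cons.mp hq with rfl | hq
          · exact Or.inl (Or.inr h3)
          · exact Or.inr ⟨q, hq, h2, h3⟩
    · rw [show pvCandStep n s p = s from by simp [pvCandStep, h]]
      constructor
      · rintro (h1 | ⟨q, hq, h2, h3⟩)
        · exact Or.inl h1
        · exact Or.inr ⟨q, List.mem_cons_of_mem _ hq, h2, h3⟩
      · rintro (h1 | ⟨q, hq, h2, h3⟩)
        · exact Or.inl h1
        · rcases List.mem_cons.mp hq with rfl | hq
          · exact absurd (beq_iff_eq.mpr h2) h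
          · exact Or.inr ⟨q, hq, h2, h3⟩

-- a '/'-terminated pattern is a prefix of n iff it is one of n's '/'-terminated take-prefixes
lemma pv_slash_prefix_iff (N E : List Char) (hE : ['/'] <:+ E) :
    E <+: N ↔ ∃ i : Nat, ∃ h : i < N.length, N[i] = '/' ∧ E = N.take (i + 1) := by
  constructor
  · intro hpre
    obtain ⟨F, rfl⟩ := hE
    refine ⟨F.length, ?_, ?_, ?_⟩
    · have := hpre.length_le; simp at this ⊢; omega
    · obtain ⟨rest, rfl⟩ := hpre
      rw [List.getElem_append_left (by simp)]
      simp
    · have h1 := List.prefix_iff_eq_take.mp hpre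
      simpa using h1
  · rintro ⟨i, h, _, rfl⟩
    exact List.take_prefix _ _

-- the key pointwise fact: B's candidate-set membership computes A's per-pattern test
lemma pv_contains_cand (n e : String) :
    PySem.Set.contains
      ((PySem.List.enumerate n.toList 0).foldl (pvCandStep n)
        (PySem.Set.add PySem.Set.empty n)) e = pvCond n e := by
  rw [Bool.eq_iff_iff, PySem.Set.contains_iff, pv_mem_foldl_candStep]
  have hmem : ∀ p : Int × Char, p ∈ PySem.List.enumerate n.toList 0 ↔
      ∃ i : Nat, ∃ h : i < n.toList.length, p = ((i : Int), n.toList[i]) := by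
    intro p
    rw [pv_mem_enumerate]
    constructor
    · rintro ⟨i, h, rfl⟩; exact ⟨i, h, by simp⟩
    · rintro ⟨i, h, rfl⟩; exact ⟨i, h, by simp⟩
  have hcand : (∃ p ∈ PySem.List.enumerate n.toList 0,
        p.2 = '/' ∧ e = PySem.Str.slice n none (some (p.1 + 1))) ↔
      (∃ i : Nat, ∃ h : i < n.toList.length, n.toList[i] = '/' ∧ e.toList = n.toList.take (i + 1)) := by
    constructor
    · rintro ⟨p, hp, hsl, rfl⟩
      obtain ⟨i, h, rfl⟩ := (hmem p).mp hp
      refine ⟨i, h, hsl, ?_⟩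
      rw [PySem.Str.toList_slice]
      simp only [PySem.Chars.slice_eq_listSlice]
      rw [show ((i : Int) + 1) = ((i + 1 : Nat) : Int) from by push_cast; ring,
        PySem.List.slice_to_natCast]
    · rintro ⟨i, h, hsl, he⟩
      refine ⟨((i : Int), n.toList[i]), (hmem _).mpr ⟨i, h, rfl⟩, hsl, ?_⟩
      apply String.toList_inj.mp
      rw [he, PySem.Str.toList_slice]
      simp only [PySem.Chars.slice_eq_listSlice]
      rw [show ((i : Int) + 1) = ((i + 1 : Nat) : Int) from by push_cast; ring,
        PySem.List.slice_to_natCast]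
  rw [hcand]
  simp only [PySem.Set.mem_add, PySem.Set.empty]
  unfold pvCond
  have hslash_list : ("/" : String).toList = ['/'] := rfl
  by_cases hsl : PySem.Str.endswith e "/" = true
  · have hsuf : ['/'] <:+ e.toList := by
      have h0 := (PySem.Chars.endswith_iff e.toList "/".toList).mp (by
        rw [← PySem.Str.endswith_eq]; exact hsl)
      rwa [hslash_list] at h0
    have hsw : PySem.Str.startswith n e = true ↔ e.toList <+: n.toList := by
      rw [PySem.Str.startswith_eq]; exact PySem.Chars.startswith_iff _ _
    rw [hsl, Bool.true_and]
    constructor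
    · rintro ((h1 | h1) | h2)
      · simp at h1
      · subst h1; simp
      · apply Bool.or_eq_true_iff.mpr
        exact Or.inl (hsw.mpr ((pv_slash_prefix_iff n.toList e.toList hsuf).mpr h2))
    · intro h
      rcases Bool.or_eq_true_iff.mp h with h1 | h1
      · exact Or.inr ((pv_slash_prefix_iff n.toList e.toList hsuf).mp (hsw.mp h1))
      · exact Or.inl (Or.inr (beq_iff_eq.mp h1).symm)
  · rw [Bool.eq_false_iff.mpr hsl, Bool.false_and, Bool.false_or]
    constructor
    · rintro ((h1 | h1) | ⟨i, h, hslash, he⟩)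
      · simp at h1
      · subst h1; simp
      · exfalso
        apply hsl
        rw [PySem.Str.endswith_eq, PySem.Chars.endswith_iff, hslash_list]
        rw [he, List.take_add_one, List.getElem?_eq_getElem h, hslash]
        exact ⟨List.take i n.toList, rfl⟩
    · intro h2
      exact Or.inl (Or.inr (beq_iff_eq.mp h2).symm)
-- ===== VERDICT (by name: the statement is the Claim_ definition above) =====
theorem content_type_is_allowed_py_spec : Claim_equal_content_type_is_allowed_py := by
  intro ct acc _
  show content_type_is_allowed_py ct acc = content_type_is_allowed_py_alt ct acc
  unfold content_type_is_allowed_py content_type_is_allowed_py_alt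
  rw [pvLoopA_eq_any]
  exact List.any_congr rfl (fun a => (pv_contains_cand (pvNormalize ct) (PySem.Str.lower a)).symm)
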